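-- pv_equiv track=rewrite | github.com/andypymont/adventofcode | 2020/day10.py | routes_through_section
-- ===== SOURCE A (Python) =====
-- from collections import deque
-- from typing import List
--
-- def routes_through_section(section: List[int]) -> int:
--     if len(section) == 1:
--         return 1
--
--     routes = 0
--     search = deque([section[0:1]])
--
--     while search:
--         route = search.popleft()
--         position = route[-1]
--         if position == max(section):
--             routes += 1
--         else:
--             for other in section:
--                 if position < other <= (position + 3):
--                     search.append(route + [other])
--
--     return routes
-- ===== SOURCE B (Python) =====
-- from collections import Counter
--
-- def routes_through_section(section):
--     target = max(section)
--     counts = Counter(section)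
--     ways = {target: 1}
--     for value in sorted(counts, reverse=True):
--         if value < target:
--             ways[value] = sum(counts.get(value + step, 0) * ways.get(value + step, 0)
--                               for step in (1, 2, 3))
--     return ways[section[0]]
-- ===== Notes on version B (the rewrite author's own statement) =====
-- stated objective: alternative
-- what changed: A enumerates every route breadth-first with a deque of whole paths (recomputing max(section) each iteration); B instead fills a dictionary by a single descending dynamic program over the distinct values, counting routes from each value to the maximum, and returns the entry for section[0].
import Mathlib
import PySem

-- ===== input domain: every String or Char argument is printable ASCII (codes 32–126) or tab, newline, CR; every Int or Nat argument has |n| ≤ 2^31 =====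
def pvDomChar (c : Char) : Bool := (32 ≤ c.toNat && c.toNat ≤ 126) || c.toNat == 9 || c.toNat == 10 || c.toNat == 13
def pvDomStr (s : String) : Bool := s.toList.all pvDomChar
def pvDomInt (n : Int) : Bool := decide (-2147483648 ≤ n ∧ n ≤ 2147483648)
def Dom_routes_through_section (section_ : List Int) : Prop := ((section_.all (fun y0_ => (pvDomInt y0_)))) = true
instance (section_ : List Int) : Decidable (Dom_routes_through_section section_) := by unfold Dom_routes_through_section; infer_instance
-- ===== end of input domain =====

-- B replaces A's breadth-first enumeration of whole routes by a descending dynamic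
-- program over the distinct values (ways to reach the maximum from each value).

-- ===== PORT A =====
-- helper lemma used by the termination proofs below (the measure weight of a queue entry)
theorem pvLast_append (l : List Int) (x : Int) :
    (PySem.List.pyGet? (l ++ [x]) (-1)).getD 0 = x := by
  simp [PySem.List.pyGet?, PySem.List.pyIdx?]

-- arithmetic helper for the termination measure of the BFS loop below
theorem pvSumPowLt (k : Nat) (es : List Nat) (e : Nat)
    (hlen : es.length ≤ k) (hlt : ∀ x ∈ es, x < e) :
    (es.map ((k+1) ^ ·)).sum < (k+1)^e := by
  cases es with
  | nil => simp only [List.map_nil, List.sum_nil]; exact Nat.pow_pos (by omega)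
  | cons a t =>
    have he : 1 ≤ e := by have := hlt a (by simp); omega
    have hb : ∀ x ∈ (a::t).map ((k+1) ^ ·), x ≤ (k+1)^(e-1) := by
      intro x hx
      simp only [List.mem_map] at hx
      obtain ⟨y, hy, rfl⟩ := hx
      exact Nat.pow_le_pow_right (by omega) (by have := hlt y hy; omega)
    calc ((a::t).map ((k+1)^·)).sum
        ≤ ((a::t).map ((k+1)^·)).length • ((k+1)^(e-1)) := List.sum_le_card_nsmul _ _ hb
      _ = ((a::t).length) * ((k+1)^(e-1)) := by simp [smul_eq_mul]
      _ ≤ k * ((k+1)^(e-1)) := Nat.mul_le_mul_right _ hlen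
      _ < (k+1) * ((k+1)^(e-1)) :=
          (Nat.mul_lt_mul_right (Nat.pow_pos (by omega))).mpr (by omega)
      _ = (k+1)^e := by rw [← pow_succ']; congr 1; omega

-- every element is bounded by max(section)
theorem pvLeMax (section_ : List Int) (q : Int) (hq : q ∈ section_) :
    q ≤ (PySem.List.max? section_ (fun x => x)).getD 0 := by
  cases hmax : PySem.List.max? section_ (fun x => x) with
  | none =>
    rw [PySem.List.max?_eq_none_iff] at hmax
    subst hmax; simp at hq
  | some m =>
    simpa using PySem.List.max?_isMax hmax _ hq

-- the children spawned from position p weigh strictly less than p's queue entry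
theorem pvChildrenSum (section_ : List Int) (p : Int) :
    (((section_.filter (fun q => decide (p < q ∧ q ≤ p + 3))).map
        (fun q => (section_.length + 1) ^
          (((PySem.List.max? section_ (fun x => x)).getD 0 + 3 - q).toNat))).sum)
      < (section_.length + 1) ^ (((PySem.List.max? section_ (fun x => x)).getD 0 + 3 - p).toNat) := by
  have h := pvSumPowLt section_.length
    ((section_.filter (fun q => decide (p < q ∧ q ≤ p + 3))).map
      (fun q => ((PySem.List.max? section_ (fun x => x)).getD 0 + 3 - q).toNat))
    (((PySem.List.max? section_ (fun x => x)).getD 0 + 3 - p).toNat)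
    (by simpa using List.length_filter_le _ _)
    (by
      intro x hx
      simp only [List.mem_map, List.mem_filter, decide_eq_true_eq] at hx
      obtain ⟨q, ⟨hmem, hlt, hle⟩, rfl⟩ := hx
      have := pvLeMax section_ q hmem
      omega)
  simpa [List.map_map, Function.comp] using h

-- the BFS loop of A: 'while search: …' over a deque of routes
def routes_bfs (section_ : List Int) (search : List (List Int)) (routes : Int) : Int :=
  match search with
  | [] => routes
  | route :: rest =>
    let position := (PySem.List.pyGet? route (-1)).getD 0
    if position = (PySem.List.max? section_ (fun x => x)).getD 0 then
      routes_bfs section_ rest (routes + 1)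
    else
      routes_bfs section_
        (section_.foldl
          (fun srch other =>
            if position < other ∧ other ≤ position + 3 then srch ++ [route ++ [other]] else srch)
          rest)
        routes
  termination_by (search.map (fun r =>
      (section_.length + 1) ^
        (((PySem.List.max? section_ (fun x => x)).getD 0 + 3 -
          (PySem.List.pyGet? r (-1)).getD 0).toNat))).sum
  decreasing_by
  · simp only [List.map_cons, List.sum_cons]
    exact Nat.lt_add_of_pos_left (Nat.pow_pos (by omega))
  · simp only [dite_eq_ite]
    rw [List.foldl_attach (f := fun srch other =>
      if (PySem.List.pyGet? route (-1)).getD 0 < other ∧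
          other ≤ (PySem.List.pyGet? route (-1)).getD 0 + 3 then
        srch ++ [route ++ [other]] else srch)]
    rw [PySem.List.foldl_append_ite (p := fun other =>
        (PySem.List.pyGet? route (-1)).getD 0 < other ∧
          other ≤ (PySem.List.pyGet? route (-1)).getD 0 + 3)
        (f := fun other => route ++ [other])]
    simp only [List.map_cons, List.sum_cons, List.map_append, List.sum_append, List.map_map,
      Function.comp_def, pvLast_append]
    have := pvChildrenSum section_ ((PySem.List.pyGet? route (-1)).getD 0)
    omega

def routes_through_section (section_ : List Int) : Int :=
  if section_.length = 1 then 1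
  else routes_bfs section_ [PySem.List.slice section_ (some 0) (some 1)] 0

-- ===== PORT B =====
def routes_through_section_alt (section_ : List Int) : Int :=
  let target := (PySem.List.max? section_ (fun x => x)).getD 0
  let counts := PySem.Dict.counter section_
  let ways := (PySem.List.sorted counts.keys (fun x => x) true).foldl
    (fun w value =>
      if value < target then
        w.insert value
          (([(1 : Int), 2, 3].map (fun step => counts.getD (value + step) 0 * w.getD (value + step) 0)).sum)
      else w)
    ((PySem.Dict.empty : PySem.Dict Int Int).insert target 1)
  (ways.get? ((PySem.List.pyGet? section_ 0).getD 0)).getD 0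

-- ===== PRECONDITION & SPEC =====
-- Pre_ excludes only the empty list, on which A raises IndexError when reading the first element.
def Pre_routes_through_section (section_ : List Int) : Prop := section_ ≠ []
instance (section_ : List Int) : Decidable (Pre_routes_through_section section_) := by

  unfold Pre_routes_through_section; infer_instance
def pvWitness_routes_through_section : List Int := [1, 2, 3]

def Spec_routes_through_section (section_ : List Int) (out : Int) : Prop := out = routes_through_section_alt section_
instance (section_ : List Int) (out : Int) : Decidable (Spec_routes_through_section section_ out) := by unfold Spec_routes_through_section; infer_instance

-- ===== CLAIM (what is proved, stated in full; the proofs are below) =====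
def Claim_equal_routes_through_section : Prop := ∀ (section_ : List Int), Dom_routes_through_section section_ → Pre_routes_through_section section_ → Spec_routes_through_section section_ (routes_through_section section_)

-- ===== LEMMAS AND PROOFS =====

-- number of routes from position p to the maximum (the common mathematical description)
def chainCount (section_ : List Int) (p : Int) : Int :=
  if p = (PySem.List.max? section_ (fun x => x)).getD 0 then 1
  else ((section_.filter (fun q => decide (p < q ∧ q ≤ p + 3))).attach.map
      (fun q => chainCount section_ q.1)).sum
  termination_by (((PySem.List.max? section_ (fun x => x)).getD 0 + 3 - p).toNat)
  decreasing_by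
  · have hq2 := q.2
    simp only [List.mem_filter, decide_eq_true_eq] at hq2
    obtain ⟨hmem, hlt, hle⟩ := hq2
    have hle' := pvLeMax section_ q.1 hmem
    omega

-- the recursion equation for chainCount without 'attach'
theorem chainCount_eq (section_ : List Int) (p : Int) :
    chainCount section_ p =
      if p = (PySem.List.max? section_ (fun x => x)).getD 0 then 1
      else ((section_.filter (fun q => decide (p < q ∧ q ≤ p + 3))).map
          (chainCount section_)).sum := by
  rw [chainCount]
  simp only [List.map_subtype, List.unattach_attach]

-- invariant of A's BFS loop: queue entries contribute the chain count of their last position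
theorem bfs_eq (section_ : List Int) (search : List (List Int)) (routes : Int) :
    routes_bfs section_ search routes =
      routes + (search.map (fun r =>
        chainCount section_ ((PySem.List.pyGet? r (-1)).getD 0))).sum := by
  fun_induction routes_bfs section_ search routes with
  | case1 => simp
  | case2 routes route rest position hpos ih =>
    rw [ih, List.map_cons, List.sum_cons, chainCount_eq, if_pos hpos]
    ring
  | case3 routes route rest position hpos ih =>
    rw [List.foldl_subtype (g := fun srch other =>
        if position < other ∧ other ≤ position + 3 then srch ++ [route ++ [other]] else srch)
      (by intro b y h; simp)] at ih
    simp only [List.unattach_attach] at ih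
    rw [ih, PySem.List.foldl_append_ite (p := fun other =>
        position < other ∧ other ≤ position + 3) (f := fun other => route ++ [other]),
      List.map_append, List.sum_append, List.map_map, List.map_cons, List.sum_cons,
      chainCount_eq, if_neg hpos]
    simp only [Function.comp_def, pvLast_append]
    ring

-- A's filter-sum grouped by the three reachable values
theorem pvGroup (s : List Int) (f : Int → Int) (p : Int) :
    ((s.filter (fun q => decide (p < q ∧ q ≤ p + 3))).map f).sum
      = (s.count (p+1) : Int) * f (p+1) + (s.count (p+2) : Int) * f (p+2)
        + (s.count (p+3) : Int) * f (p+3) := by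
  have ccons : ∀ (a : Int) (t : List Int) (v : Int),
      (((a :: t).count v : Int)) = (t.count v : Int) + (if a = v then (1 : Int) else 0) := by
    intro a t v
    rw [List.count_cons]
    by_cases h : a = v <;> simp [h]
  induction s with
  | nil => simp
  | cons a t ih =>
    by_cases hp : p < a ∧ a ≤ p + 3
    · rw [List.filter_cons_of_pos (by simpa using hp), List.map_cons, List.sum_cons, ih]
      simp only [ccons]
      have h3 : a = p + 1 ∨ a = p + 2 ∨ a = p + 3 := by omega
      rcases h3 with h | h | h
      · subst h
        rw [if_pos rfl, if_neg (by omega : ¬(p + 1 : Int) = p + 2),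
          if_neg (by omega : ¬(p + 1 : Int) = p + 3)]
        ring
      · subst h
        rw [if_neg (by omega : ¬(p + 2 : Int) = p + 1), if_pos rfl,
          if_neg (by omega : ¬(p + 2 : Int) = p + 3)]
        ring
      · subst h
        rw [if_neg (by omega : ¬(p + 3 : Int) = p + 1),
          if_neg (by omega : ¬(p + 3 : Int) = p + 2), if_pos rfl]
        ring
    · rw [List.filter_cons_of_neg (by simpa using hp), ih]
      simp only [ccons]
      rw [if_neg (by omega : ¬a = p + 1), if_neg (by omega : ¬a = p + 2),
        if_neg (by omega : ¬a = p + 3)]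
      ring

-- chainCount below the maximum, as B computes it
theorem chainCount_grouped (s : List Int) (p : Int)
    (hp : p ≠ (PySem.List.max? s (fun x => x)).getD 0) :
    chainCount s p = (s.count (p+1) : Int) * chainCount s (p+1)
      + (s.count (p+2) : Int) * chainCount s (p+2)
      + (s.count (p+3) : Int) * chainCount s (p+3) := by
  rw [chainCount_eq, if_neg hp, pvGroup]

theorem chainCount_max (s : List Int) :
    chainCount s ((PySem.List.max? s (fun x => x)).getD 0) = 1 := by
  rw [chainCount_eq, if_pos rfl]

-- the DP fold of B fills the table with chain counts
theorem fold_inv (s : List Int) (l : List Int) (w : PySem.Dict Int Int)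
    (hsub : ∀ x ∈ l, x ∈ s)
    (hsorted : List.Pairwise (fun a b => b ≤ a) l)
    (hinv : ∀ u ∈ s, (u ∈ l ∧ u < (PySem.List.max? s (fun x => x)).getD 0)
        ∨ w.getD u 0 = chainCount s u) :
    ∀ u ∈ s,
      (l.foldl (fun w value =>
        if value < (PySem.List.max? s (fun x => x)).getD 0 then
          w.insert value
            (([(1 : Int), 2, 3].map (fun step =>
              (PySem.Dict.counter s).getD (value + step) 0 * w.getD (value + step) 0)).sum)
        else w) w).getD u 0 = chainCount s u := by
  induction l generalizing w with
  | nil =>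
    intro u hu
    rcases hinv u hu with ⟨h, _⟩ | h
    · simp at h
    · simpa using h
  | cons v l' ih =>
    rw [List.foldl_cons]
    have hvhead : ∀ y ∈ l', y ≤ v := by
      intro y hy
      exact (List.pairwise_cons.mp hsorted).1 y hy
    -- value of the table at positions strictly above v is already correct
    have habove : ∀ u' ∈ s, v < u' → w.getD u' 0 = chainCount s u' := by
      intro u' hu' hvu
      rcases hinv u' hu' with ⟨hmem, _⟩ | h
      · rcases List.mem_cons.mp hmem with rfl | hmem'
        · omega
        · have := hvhead u' hmem'
          omega
      · exact h
    apply ih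
    · intro x hx; exact hsub x (List.mem_cons_of_mem _ hx)
    · exact (List.pairwise_cons.mp hsorted).2
    · intro u hu
      by_cases huv : u = v
      · subst huv
        right
        by_cases hvM : u < (PySem.List.max? s (fun x => x)).getD 0
        · rw [if_pos hvM, PySem.Dict.getD_insert_self]
          have hterm : ∀ d : Int, 0 < d →
              (PySem.Dict.counter s).getD (u + d) 0 * w.getD (u + d) 0
              = (s.count (u + d) : Int) * chainCount s (u + d) := by
            intro d hd
            rw [PySem.Dict.getD_counter]
            by_cases hc : s.count (u + d) = 0
            · rw [hc]; push_cast; ring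
            · have hmem : u + d ∈ s := List.count_pos_iff.mp (by omega)
              rw [habove _ hmem (by omega)]
          simp only [List.map_cons, List.map_nil, List.sum_cons, List.sum_nil]
          rw [hterm 1 (by norm_num), hterm 2 (by norm_num), hterm 3 (by norm_num)]
          rw [chainCount_grouped s u (by omega)]
          ring
        · rw [if_neg hvM]
          rcases hinv u hu with ⟨_, hlt⟩ | h
          · omega
          · exact h
      · have hgd : (if v < (PySem.List.max? s (fun x => x)).getD 0 then
              w.insert v (([(1 : Int), 2, 3].map (fun step =>
                (PySem.Dict.counter s).getD (v + step) 0 * w.getD (v + step) 0)).sum)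
            else w).getD u 0 = w.getD u 0 := by
          split
          · rw [PySem.Dict.getD_insert, if_neg huv]
          · rfl
        rcases hinv u hu with ⟨hmem, hlt⟩ | h
        · left
          exact ⟨List.mem_cons.mp hmem |>.resolve_left huv, hlt⟩
        · right
          rw [hgd, h]

-- B computes the chain count of the first element
theorem B_eq (section_ : List Int) (x : Int) (t : List Int) (hs : section_ = x :: t) :
    routes_through_section_alt section_ = chainCount section_ x := by
  have hxs : x ∈ section_ := by rw [hs]; exact List.mem_cons_self
  have hfold := fold_inv section_
    (PySem.List.sorted (PySem.Dict.counter section_).keys (fun x => x) true)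
    ((PySem.Dict.empty : PySem.Dict Int Int).insert
      ((PySem.List.max? section_ (fun x => x)).getD 0) 1)
    (by
      intro y hy
      have := (PySem.List.sorted_perm (PySem.Dict.counter section_).keys (fun x => x) true).mem_iff.mp hy
      rw [PySem.Dict.keys_counter, PySem.Set.mem_ofList] at this
      exact this)
    (PySem.List.sorted_pairwise_rev _ _)
    (by
      intro u hu
      by_cases huM : u = (PySem.List.max? section_ (fun x => x)).getD 0
      · subst huM
        right
        rw [PySem.Dict.getD_insert_self, chainCount_max]
      · left
        constructor
        · have : u ∈ (PySem.Dict.counter section_).keys := by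
            rw [PySem.Dict.keys_counter, PySem.Set.mem_ofList]
            exact hu
          exact (PySem.List.sorted_perm (PySem.Dict.counter section_).keys
            (fun x => x) true).mem_iff.mpr this
        · have := pvLeMax section_ u hu
          omega)
    x hxs
  have hhead : (PySem.List.pyGet? section_ 0).getD 0 = x := by
    rw [hs]; simp [PySem.List.pyGet?, PySem.List.pyIdx?]
  unfold routes_through_section_alt
  rw [hhead, ← PySem.Dict.getD_eq_get?_getD]
  exact hfold

-- A computes the chain count of the first element
theorem A_eq (section_ : List Int) (x : Int) (t : List Int) (hs : section_ = x :: t) :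
    routes_through_section section_ = chainCount section_ x := by
  unfold routes_through_section
  by_cases hlen : section_.length = 1
  · rw [if_pos hlen]
    have ht : t = [] := by
      subst hs; simp at hlen; exact hlen
    subst ht; subst hs
    have : (PySem.List.max? [x] (fun x => x)).getD 0 = x := by
      simp [PySem.List.max?_id_cons]
    rw [chainCount_eq, this, if_pos rfl]
  · rw [if_neg hlen, bfs_eq]
    have hslice : PySem.List.slice section_ (some 0) (some 1) = [x] := by
      rw [hs]; simp [PySem.List.slice]
    rw [hslice]
    have : (PySem.List.pyGet? [x] (-1)).getD 0 = x := pvLast_append [] x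
    simp [this]

-- ===== VERDICT (by name: the statement is the Claim_ definition above) =====
theorem routes_through_section_spec : Claim_equal_routes_through_section := by
  intro section_ _ hpre
  obtain ⟨x, t, hs⟩ := List.exists_cons_of_ne_nil hpre
  unfold Spec_routes_through_section
  rw [A_eq section_ x t hs, B_eq section_ x t hs]
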